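-- pv_equiv track=rewrite | github.com/msaad00/agent-bom | src/agent_bom/ast_js_ts.py | _frameworks_from_js_modules
-- ===== SOURCE A (Python) =====
-- _JS_TS_FRAMEWORK_HINTS: dict[str, str] = {
--     "@modelcontextprotocol/sdk": "MCP",
--     "@anthropic-ai/sdk": "Anthropic",
--     "anthropic": "Anthropic",
--     "@langchain": "LangChain",
--     "langchain": "LangChain",
--     "@openai/agents": "OpenAI Agents",
--     "openai": "OpenAI",
--     "@mastra/core": "Mastra",
--     "mastra": "Mastra",
--     "@vercel/ai": "Vercel AI SDK",
-- }
--
-- def _frameworks_from_js_modules(module_names: set[str]) -> list[str]: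
--     frameworks: set[str] = set()
--     for module_name in module_names:
--         normalized = module_name.strip().lower()
--         for prefix, framework in _JS_TS_FRAMEWORK_HINTS.items():
--             if normalized == prefix or normalized.startswith(f"{prefix}/"):
--                 frameworks.add(framework)
--     return sorted(frameworks)
-- ===== SOURCE B (Python) =====
-- _JS_TS_FRAMEWORK_HINTS: dict[str, str] = {
--     "@modelcontextprotocol/sdk": "MCP",
--     "@anthropic-ai/sdk": "Anthropic",
--     "anthropic": "Anthropic",
--     "@langchain": "LangChain",
--     "langchain": "LangChain",
--     "@openai/agents": "OpenAI Agents",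
--     "openai": "OpenAI",
--     "@mastra/core": "Mastra",
--     "mastra": "Mastra",
--     "@vercel/ai": "Vercel AI SDK",
-- }
--
-- def _frameworks_from_js_modules(module_names):
--     frameworks = set()
--     for module_name in module_names:
--         s = module_name.strip().lower()
--         # candidates: every prefix of s ending at a slash boundary, plus s itself
--         candidates = [s[:i] for i, c in enumerate(s) if c == '/'] + [s]
--         for cand in candidates:
--             fw = _JS_TS_FRAMEWORK_HINTS.get(cand)
--             if fw is not None:
--                 frameworks.add(fw)
--     return sorted(frameworks)
-- ===== Notes on version B (the rewrite author's own statement) =====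
-- stated objective: idiomatic
-- what changed: Instead of scanning the whole 10-entry hint table per module with equality/startswith tests, B generates the module's '/'-boundary prefixes (plus the full name, typically 1-2 candidates) and looks each up directly in the hint dict with .get.
import Mathlib
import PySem

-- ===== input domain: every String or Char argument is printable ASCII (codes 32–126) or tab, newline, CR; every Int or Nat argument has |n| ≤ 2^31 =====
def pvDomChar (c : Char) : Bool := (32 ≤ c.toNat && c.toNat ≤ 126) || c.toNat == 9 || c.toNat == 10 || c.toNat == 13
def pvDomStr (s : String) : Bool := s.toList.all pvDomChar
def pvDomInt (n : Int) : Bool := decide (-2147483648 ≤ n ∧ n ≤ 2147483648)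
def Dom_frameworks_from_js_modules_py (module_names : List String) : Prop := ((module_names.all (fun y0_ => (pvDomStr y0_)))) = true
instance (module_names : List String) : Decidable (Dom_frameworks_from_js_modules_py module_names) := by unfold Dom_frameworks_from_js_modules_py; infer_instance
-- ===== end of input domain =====

-- B replaces A's per-module scan of the whole hint table by direct dict lookups of the
-- module's own '/'-boundary prefixes (idiomatic dict lookup; return value proved equal).

-- the hint table, in source order (A iterates its .items())
def pvHints : List (String × String) :=
  [("@modelcontextprotocol/sdk", "MCP"),
   ("@anthropic-ai/sdk", "Anthropic"),
   ("anthropic", "Anthropic"),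
   ("@langchain", "LangChain"),
   ("langchain", "LangChain"),
   ("@openai/agents", "OpenAI Agents"),
   ("openai", "OpenAI"),
   ("@mastra/core", "Mastra"),
   ("mastra", "Mastra"),
   ("@vercel/ai", "Vercel AI SDK")]

-- ===== PORT A =====
def pvInnerA (fw : PySem.Set String) (normalized : String) : PySem.Set String :=
  pvHints.foldl (fun fw pf =>
    if normalized = pf.1 ∨ PySem.Str.startswith normalized (pf.1 ++ "/") = true then
      PySem.Set.add fw pf.2
    else fw) fw

def frameworks_from_js_modules_py (module_names : List String) : List String :=
  let frameworks : PySem.Set String :=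
    module_names.foldl (fun fw module_name =>
      pvInnerA fw (PySem.Str.lower (PySem.Str.strip module_name))) PySem.Set.empty
  PySem.List.sorted frameworks (fun x => x) false

-- ===== PORT B =====
-- the same table as a dict, looked up with .get
def pvHintsD : PySem.Dict String String := PySem.Dict.ofList pvHints

-- [s[:i] for i, c in enumerate(s) if c == '/'] + [s]
def pvCandidates (s : String) : List String :=
  ((PySem.List.enumerate s.toList 0).filter (fun ic => ic.2 == '/')).map
    (fun ic => PySem.Str.slice s none (some ic.1)) ++ [s]

def pvInnerB (fw : PySem.Set String) (s : String) : PySem.Set String :=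
  (pvCandidates s).foldl (fun fw cand =>
    match PySem.Dict.get? pvHintsD cand with
    | some f => PySem.Set.add fw f
    | none => fw) fw

def frameworks_from_js_modules_py_alt (module_names : List String) : List String :=
  let frameworks : PySem.Set String :=
    module_names.foldl (fun fw module_name =>
      pvInnerB fw (PySem.Str.lower (PySem.Str.strip module_name))) PySem.Set.empty
  PySem.List.sorted frameworks (fun x => x) false

-- ===== PRECONDITION & SPEC =====
def Spec_frameworks_from_js_modules_py (module_names : List String) (out : List String) : Prop := out = frameworks_from_js_modules_py_alt module_names
instance (module_names : List String) (out : List String) : Decidable (Spec_frameworks_from_js_modules_py module_names out) := by unfold Spec_frameworks_from_js_modules_py; infer_instance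

-- ===== CLAIM (what is proved, stated in full; the proofs are below) =====
def Claim_equal_frameworks_from_js_modules_py : Prop := ∀ (module_names : List String), Dom_frameworks_from_js_modules_py module_names → Spec_frameworks_from_js_modules_py module_names (frameworks_from_js_modules_py module_names)

-- ===== LEMMAS AND PROOFS =====

-- membership through A's inner fold
theorem pv_mem_foldA (l : List (String × String)) (s : String)
    (fw : PySem.Set String) (f : String) :
    f ∈ l.foldl (fun fw pf =>
        if s = pf.1 ∨ PySem.Str.startswith s (pf.1 ++ "/") = true then
          PySem.Set.add fw pf.2
        else fw) fw ↔
      f ∈ fw ∨ ∃ pf ∈ l, (s = pf.1 ∨ PySem.Str.startswith s (pf.1 ++ "/") = true) ∧ f = pf.2 := by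
  induction l generalizing fw with
  | nil => simp
  | cons p t ih =>
    simp only [List.foldl_cons, ih, List.mem_cons]
    by_cases h : s = p.1 ∨ PySem.Str.startswith s (p.1 ++ "/") = true
    · simp only [if_pos h, PySem.Set.mem_add]
      constructor
      · rintro ((hf | rfl) | ⟨pf, hpf, hc, rfl⟩)
        · exact Or.inl hf
        · exact Or.inr ⟨p, Or.inl rfl, h, rfl⟩
        · exact Or.inr ⟨pf, Or.inr hpf, hc, rfl⟩
      · rintro (hf | ⟨pf, (rfl | hpf), hc, rfl⟩)
        · exact Or.inl (Or.inl hf)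
        · exact Or.inl (Or.inr rfl)
        · exact Or.inr ⟨pf, hpf, hc, rfl⟩
    · simp only [if_neg h]
      constructor
      · rintro (hf | ⟨pf, hpf, hc, rfl⟩)
        · exact Or.inl hf
        · exact Or.inr ⟨pf, Or.inr hpf, hc, rfl⟩
      · rintro (hf | ⟨pf, (rfl | hpf), hc, rfl⟩)
        · exact Or.inl hf
        · exact absurd hc h
        · exact Or.inr ⟨pf, hpf, hc, rfl⟩

theorem pv_nodup_foldA (l : List (String × String)) (s : String)
    (fw : PySem.Set String) (h : fw.Nodup) :
    (l.foldl (fun fw pf =>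
        if s = pf.1 ∨ PySem.Str.startswith s (pf.1 ++ "/") = true then
          PySem.Set.add fw pf.2
        else fw) fw).Nodup := by
  induction l generalizing fw with
  | nil => simpa
  | cons p t ih =>
    simp only [List.foldl_cons]
    split
    · exact ih _ (PySem.Set.nodup_add _ _ h)
    · exact ih _ h

-- membership through B's inner fold
theorem pv_mem_foldB (l : List String)
    (fw : PySem.Set String) (f : String) :
    f ∈ l.foldl (fun fw cand => match PySem.Dict.get? pvHintsD cand with
        | some v => PySem.Set.add fw v
        | none => fw) fw ↔
      f ∈ fw ∨ ∃ cand ∈ l, PySem.Dict.get? pvHintsD cand = some f := by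
  induction l generalizing fw with
  | nil => simp
  | cons x t ih =>
    simp only [List.foldl_cons, ih, List.mem_cons]
    cases hx : PySem.Dict.get? pvHintsD x with
    | none =>
      constructor
      · rintro (hf | ⟨c, hc, hg⟩)
        · exact Or.inl hf
        · exact Or.inr ⟨c, Or.inr hc, hg⟩
      · rintro (hf | ⟨c, (rfl | hc), hg⟩)
        · exact Or.inl hf
        · exact absurd hg (by simp [hx])
        · exact Or.inr ⟨c, hc, hg⟩
    | some v =>
      simp only [PySem.Set.mem_add]
      constructor
      · rintro ((hf | rfl) | ⟨c, hc, hg⟩)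
        · exact Or.inl hf
        · exact Or.inr ⟨x, Or.inl rfl, hx⟩
        · exact Or.inr ⟨c, Or.inr hc, hg⟩
      · rintro (hf | ⟨c, (rfl | hc), hg⟩)
        · exact Or.inl (Or.inl hf)
        · rw [hx] at hg; exact Or.inl (Or.inr (Option.some_injective _ hg.symm))
        · exact Or.inr ⟨c, hc, hg⟩

theorem pv_nodup_foldB (l : List String)
    (fw : PySem.Set String) (h : fw.Nodup) :
    (l.foldl (fun fw cand => match PySem.Dict.get? pvHintsD cand with
        | some v => PySem.Set.add fw v
        | none => fw) fw).Nodup := by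
  induction l generalizing fw with
  | nil => simpa
  | cons x t ih =>
    simp only [List.foldl_cons]
    cases hx : PySem.Dict.get? pvHintsD x <;> simp only [hx]
    · exact ih _ h
    · exact ih _ (PySem.Set.nodup_add _ _ h)

-- characterisation of '/'-boundary prefixes on the char level
theorem pv_prefix_slash (cs ps : List Char) :
    (ps ++ ['/']) <+: cs ↔ ∃ k, ∃ h : k < cs.length, cs[k] = '/' ∧ ps = cs.take k := by
  constructor
  · intro h
    refine ⟨ps.length, ?_, ?_, ?_⟩
    · have := h.length_le; simp at this; omega
    · have h1 := h.getElem (i := ps.length) (by simp)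
      simpa using h1.symm
    · have h2 : ps <+: cs := (List.prefix_append ps ['/']).trans h
      exact List.prefix_iff_eq_take.mp h2
  · rintro ⟨k, hk, hc, rfl⟩
    have : cs.take (k + 1) = cs.take k ++ ['/'] := by
      rw [List.take_succ]
      simp [List.getElem?_eq_getElem hk, hc]
    rw [← this]
    exact List.take_prefix _ _

-- membership in B's candidate list
theorem pv_mem_candidates (s p : String) :
    p ∈ pvCandidates s ↔
      p = s ∨ ∃ k, ∃ h : k < s.toList.length, s.toList[k] = '/' ∧ p.toList = s.toList.take k := by
  simp only [pvCandidates, List.mem_append, List.mem_singleton, List.mem_map, List.mem_filter,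
    PySem.List.mem_enumerate_iff]
  constructor
  · rintro (⟨ic, ⟨⟨k, hk, rfl⟩, hsl⟩, rfl⟩ | rfl)
    · right
      refine ⟨k, hk, by simpa using hsl, ?_⟩
      have h0 : ((0 : Int) + (k : Int)) = ((k : Int)) := by omega
      simp [h0, PySem.Str.toList_slice, PySem.Chars.slice_eq_listSlice,
        PySem.List.slice_to_natCast]
    · exact Or.inl rfl
  · rintro (rfl | ⟨k, hk, hc, hp⟩)
    · exact Or.inr rfl
    · left
      refine ⟨((0 : Int) + (k : Int), '/'), ⟨⟨k, hk, by simp [hc]⟩, by simp⟩, ?_⟩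
      apply String.ext
      rw [hp]
      simp [PySem.Str.toList_slice, PySem.Chars.slice_eq_listSlice, PySem.List.slice_to_natCast]

-- A's match condition ↔ p is a candidate of s
theorem pv_cond_iff (s p : String) :
    (s = p ∨ PySem.Str.startswith s (p ++ "/") = true) ↔ p ∈ pvCandidates s := by
  rw [pv_mem_candidates, PySem.Str.startswith_eq, PySem.Chars.startswith_iff]
  have happ : (p ++ "/").toList = p.toList ++ ['/'] := by simp
  rw [happ, pv_prefix_slash]
  constructor
  · rintro (rfl | ⟨k, hk, hc, ht⟩)
    · exact Or.inl rfl
    · exact Or.inr ⟨k, hk, hc, ht⟩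
  · rintro (rfl | ⟨k, hk, hc, ht⟩)
    · exact Or.inl rfl
    · exact Or.inr ⟨k, hk, hc, ht⟩

-- per-module: the frameworks A adds are exactly the frameworks B adds
theorem pv_core (s f : String) :
    (∃ pf ∈ pvHints, (s = pf.1 ∨ PySem.Str.startswith s (pf.1 ++ "/") = true) ∧ f = pf.2) ↔
      ∃ cand ∈ pvCandidates s, PySem.Dict.get? pvHintsD cand = some f := by
  constructor
  · rintro ⟨pf, hmem, hcond, rfl⟩
    refine ⟨pf.1, (pv_cond_iff s pf.1).mp hcond, ?_⟩
    fin_cases hmem <;> decide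
  · rintro ⟨cand, hmem, hget⟩
    have h : ∃ pf ∈ pvHints, cand = pf.1 ∧ f = pf.2 := by
      have hd : pvHintsD = PySem.Dict.mk pvHints := by decide
      rw [hd] at hget
      simp only [pvHints, PySem.Dict.get?_mk_cons] at hget
      simp only [pvHints, List.mem_cons]
      split_ifs at hget with h1 h2 h3 h4 h5 h6 h7 h8 h9 h10 <;>
        simp_all <;> tauto
    obtain ⟨pf, hpf, rfl, rfl⟩ := h
    exact ⟨pf, hpf, (pv_cond_iff s pf.1).mpr hmem, rfl⟩

theorem pv_mem_A (module_names : List String) (fw : PySem.Set String) (f : String) :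
    f ∈ module_names.foldl (fun fw m => pvInnerA fw (PySem.Str.lower (PySem.Str.strip m))) fw ↔
      f ∈ fw ∨ ∃ m ∈ module_names, ∃ pf ∈ pvHints,
        (PySem.Str.lower (PySem.Str.strip m) = pf.1 ∨
          PySem.Str.startswith (PySem.Str.lower (PySem.Str.strip m)) (pf.1 ++ "/") = true) ∧ f = pf.2 := by
  induction module_names generalizing fw with
  | nil => simp
  | cons m t ih =>
    rw [List.foldl_cons, ih]
    simp only [pvInnerA]
    rw [pv_mem_foldA]
    simp only [List.mem_cons]
    constructor
    · rintro ((hf | h) | ⟨m', hm', h⟩)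
      · exact Or.inl hf
      · exact Or.inr ⟨m, Or.inl rfl, h⟩
      · exact Or.inr ⟨m', Or.inr hm', h⟩
    · rintro (hf | ⟨m', (rfl | hm'), h⟩)
      · exact Or.inl (Or.inl hf)
      · exact Or.inl (Or.inr h)
      · exact Or.inr ⟨m', hm', h⟩

theorem pv_mem_B (module_names : List String) (fw : PySem.Set String) (f : String) :
    f ∈ module_names.foldl (fun fw m => pvInnerB fw (PySem.Str.lower (PySem.Str.strip m))) fw ↔
      f ∈ fw ∨ ∃ m ∈ module_names, ∃ cand ∈ pvCandidates (PySem.Str.lower (PySem.Str.strip m)),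
        PySem.Dict.get? pvHintsD cand = some f := by
  induction module_names generalizing fw with
  | nil => simp
  | cons m t ih =>
    rw [List.foldl_cons, ih]
    simp only [pvInnerB]
    rw [pv_mem_foldB]
    simp only [List.mem_cons]
    constructor
    · rintro ((hf | h) | ⟨m', hm', h⟩)
      · exact Or.inl hf
      · exact Or.inr ⟨m, Or.inl rfl, h⟩
      · exact Or.inr ⟨m', Or.inr hm', h⟩
    · rintro (hf | ⟨m', (rfl | hm'), h⟩)
      · exact Or.inl (Or.inl hf)
      · exact Or.inl (Or.inr h)
      · exact Or.inr ⟨m', hm', h⟩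

theorem pv_nodup_A (module_names : List String) (fw : PySem.Set String) (h : fw.Nodup) :
    (module_names.foldl (fun fw m => pvInnerA fw (PySem.Str.lower (PySem.Str.strip m))) fw).Nodup := by
  induction module_names generalizing fw with
  | nil => simpa
  | cons m t ih =>
    rw [List.foldl_cons]
    exact ih (pvInnerA fw (PySem.Str.lower (PySem.Str.strip m)))
      (pv_nodup_foldA pvHints (PySem.Str.lower (PySem.Str.strip m)) fw h)

theorem pv_nodup_B (module_names : List String) (fw : PySem.Set String) (h : fw.Nodup) :
    (module_names.foldl (fun fw m => pvInnerB fw (PySem.Str.lower (PySem.Str.strip m))) fw).Nodup := by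
  induction module_names generalizing fw with
  | nil => simpa
  | cons m t ih =>
    rw [List.foldl_cons]
    exact ih (pvInnerB fw (PySem.Str.lower (PySem.Str.strip m)))
      (pv_nodup_foldB (pvCandidates (PySem.Str.lower (PySem.Str.strip m))) fw h)

-- ===== VERDICT (by name: the statement is the Claim_ definition above) =====
theorem frameworks_from_js_modules_py_spec : Claim_equal_frameworks_from_js_modules_py := by
  intro module_names _
  unfold Spec_frameworks_from_js_modules_py
  simp only [frameworks_from_js_modules_py, frameworks_from_js_modules_py_alt, PySem.Set.empty]
  apply PySem.List.sorted_eq_sorted_of_perm _ _ _ (fun a b h => h)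
  rw [List.perm_ext_iff_of_nodup (pv_nodup_A _ _ List.nodup_nil) (pv_nodup_B _ _ List.nodup_nil)]
  intro f
  rw [pv_mem_A, pv_mem_B]
  constructor
  · rintro (h | ⟨m, hm, h⟩)
    · simp [PySem.Set.empty] at h
    · exact Or.inr ⟨m, hm, (pv_core _ f).mp h⟩
  · rintro (h | ⟨m, hm, h⟩)
    · simp [PySem.Set.empty] at h
    · exact Or.inr ⟨m, hm, (pv_core _ f).mpr h⟩
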